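-- pv_equiv track=rewrite | github.com/ManuLasker/cloudformation_json_params_generator | create_param_file_json.py | get_params_section
-- ===== SOURCE A (Python) =====
-- from typing import Any, Dict, Tuple, List, Union
--
-- AWS_CLOUDFORMATION_PARAMETERS_SECTION_NAME = "Parameters"
--
-- AWS_CLOUDFORMATION_SECTIONS_LIST: List[str] = ["AWSTemplateFormatVersion",
--                                                "Description",
--                                                "Metadata",
--                                                "Parameters",
--                                                "Rules",
--                                                "Mappings",
--                                                "Conditions",
--                                                "Transform",
--                                                "Resources",
--                                                "Outputs"]
--
-- def get_params_section(yaml_content_lines: List[str]) -> List[str]: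
--     yaml_content_filtered = []
--     sw_found_start = False
--     for index, line in enumerate(yaml_content_lines):
--         if AWS_CLOUDFORMATION_PARAMETERS_SECTION_NAME in line:
--             sw_found_start = True
--             for param_line in yaml_content_lines[index + 1:]:
--                 if is_not_aws_cloudformation_sections(param_line):
--                     yaml_content_filtered.append(param_line)
--                 else:
--                     break
--         if sw_found_start:
--             break
--     return yaml_content_filtered
--
-- def is_not_aws_cloudformation_sections(line: str) -> bool:
--     for section in AWS_CLOUDFORMATION_SECTIONS_LIST:
--         if section in line and section == line.rstrip().rstrip(":"):
--             return False
--     return True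
-- ===== SOURCE B (Python) =====
-- from typing import List
--
-- AWS_CLOUDFORMATION_SECTIONS_LIST: List[str] = ["AWSTemplateFormatVersion",
--                                                "Description",
--                                                "Metadata",
--                                                "Parameters",
--                                                "Rules",
--                                                "Mappings",
--                                                "Conditions",
--                                                "Transform",
--                                                "Resources",
--                                                "Outputs"]
--
-- def is_not_aws_cloudformation_sections(line: str) -> bool:
--     for section in AWS_CLOUDFORMATION_SECTIONS_LIST:
--         if section in line and section == line.rstrip().rstrip(":"):
--             return False
--     return True
--
-- def get_params_section(yaml_content_lines: List[str]) -> List[str]: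
--     # single pass with a state flag instead of find-then-slice-then-inner-loop
--     result: List[str] = []
--     started = False
--     for line in yaml_content_lines:
--         if not started:
--             if "Parameters" in line:
--                 started = True
--         elif is_not_aws_cloudformation_sections(line):
--             result.append(line)
--         else:
--             break
--     return result
-- ===== Notes on version B (the rewrite author's own statement) =====
-- stated objective: simpler
-- what changed: Replaces the nested find-then-slice-and-collect loops (enumerate, slice yaml_content_lines[index+1:], inner loop, break flag) with one single-pass state machine that flips a started flag at the first 'Parameters' line and then collects until a section header.
import Mathlib
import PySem

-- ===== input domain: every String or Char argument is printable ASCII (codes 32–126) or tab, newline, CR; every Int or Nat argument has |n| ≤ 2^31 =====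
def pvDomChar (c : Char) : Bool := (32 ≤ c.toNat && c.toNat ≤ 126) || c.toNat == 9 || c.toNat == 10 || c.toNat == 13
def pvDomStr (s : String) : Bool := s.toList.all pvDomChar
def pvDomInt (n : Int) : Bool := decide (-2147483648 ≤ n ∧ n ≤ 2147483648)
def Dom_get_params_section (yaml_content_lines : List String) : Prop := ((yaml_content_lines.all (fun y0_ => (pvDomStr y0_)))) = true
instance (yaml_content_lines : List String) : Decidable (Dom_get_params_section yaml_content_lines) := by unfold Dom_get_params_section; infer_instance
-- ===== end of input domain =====

-- B replaces A's find-then-slice-and-collect nested loops by a single pass with a started flag (objective: simpler).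

-- ===== PORT A =====
def awsCloudformationSectionsList : List String :=
  ["AWSTemplateFormatVersion", "Description", "Metadata", "Parameters", "Rules",
   "Mappings", "Conditions", "Transform", "Resources", "Outputs"]

-- hand port of s.rstrip(":"): drop trailing ':' characters (exact for a one-char strip set)
def rstripColons (cs : List Char) : List Char :=
  ((cs.reverse.dropWhile (· == ':')).reverse)

def is_not_aws_cloudformation_sections (line : String) : Bool :=
  -- 'for section in …: if section in line and section == line.rstrip().rstrip(":"): return False; return True'
  !(awsCloudformationSectionsList.any (fun sec =>
      PySem.Str.isIn sec line &&
      sec.toList == rstripColons (PySem.Str.rstrip line).toList))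

-- inner loop: 'for param_line in yaml_content_lines[index+1:]: append if not a section else break'
def getParamsInner (acc : List String) : List String → List String
  | [] => acc
  | l :: rest =>
      if is_not_aws_cloudformation_sections l then getParamsInner (acc ++ [l]) rest else acc

-- outer loop over enumerate(yaml_content_lines); sw_found_start → break right after the inner loop
def getParamsOuter (all : List String) (idx : Int) : List String → List String
  | [] => []
  | line :: rest =>
      if PySem.Str.isIn "Parameters" line then
        getParamsInner [] (PySem.List.slice all (some (idx + 1)) none)
      else getParamsOuter all (idx + 1) rest

def get_params_section (yaml_content_lines : List String) : List String :=
  getParamsOuter yaml_content_lines 0 yaml_content_lines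

-- ===== PORT B =====
-- single pass; the Bool is B's 'started' flag
def getParamsGo : Bool → List String → List String
  | _, [] => []
  | false, l :: rest =>
      if PySem.Str.isIn "Parameters" l then getParamsGo true rest else getParamsGo false rest
  | true, l :: rest =>
      if is_not_aws_cloudformation_sections l then l :: getParamsGo true rest else []

def get_params_section_alt (yaml_content_lines : List String) : List String :=
  getParamsGo false yaml_content_lines

-- ===== PRECONDITION & SPEC =====
def Spec_get_params_section (yaml_content_lines : List String) (out : List String) : Prop := out = get_params_section_alt yaml_content_lines
instance (yaml_content_lines : List String) (out : List String) : Decidable (Spec_get_params_section yaml_content_lines out) := by unfold Spec_get_params_section; infer_instance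

-- ===== CLAIM (what is proved, stated in full; the proofs are below) =====
def Claim_equal_get_params_section : Prop := ∀ (yaml_content_lines : List String), Dom_get_params_section yaml_content_lines → Spec_get_params_section yaml_content_lines (get_params_section yaml_content_lines)

-- ===== LEMMAS AND PROOFS =====

-- A's inner collecting loop is B's started-phase, prefixed by the accumulator
theorem getParamsInner_eq (ls : List String) :
    ∀ acc, getParamsInner acc ls = acc ++ getParamsGo true ls := by
  induction ls with
  | nil => intro acc; simp [getParamsInner, getParamsGo]
  | cons l rest ih =>
      intro acc
      simp only [getParamsInner, getParamsGo]
      split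
      · rw [ih]; simp
      · simp

-- the slice yaml_content_lines[index+1:] is exactly the remaining suffix
theorem slice_suffix (pre : List String) (l : String) (rest : List String) :
    PySem.List.slice (pre ++ l :: rest) (some ((pre.length : Int) + 1)) none = rest := by
  have h : ((pre.length : Int) + 1) = ((pre.length + 1 : Nat) : Int) := by push_cast; ring
  rw [h, PySem.List.slice_from]
  have h2 : ((pre.length + 1 : Nat) : Int).toNat = pre.length + 1 := by omega
  rw [h2]
  · calc List.drop (pre.length + 1) (pre ++ l :: rest)
        = List.drop 1 (l :: rest) := by
          simp
      _ = rest := by simp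
  · positivity

-- loop invariant: the outer scan at position |pre| over the suffix equals B's not-started phase
theorem getParamsOuter_eq (rest : List String) :
    ∀ pre : List String, getParamsOuter (pre ++ rest) (pre.length : Int) rest = getParamsGo false rest := by
  induction rest with
  | nil => intro pre; simp [getParamsOuter, getParamsGo]
  | cons l rs ih =>
      intro pre
      simp only [getParamsOuter, getParamsGo]
      split
      · rw [slice_suffix, getParamsInner_eq]; simp
      · have h := ih (pre ++ [l])
        simpa using h

-- ===== VERDICT (by name: the statement is the Claim_ definition above) =====
theorem get_params_section_spec : Claim_equal_get_params_section := by
  intro ls _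
  unfold Spec_get_params_section get_params_section get_params_section_alt
  have h := getParamsOuter_eq ls []
  simpa using h
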